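-- pv_equiv track=rewrite | github.com/jsboigeEPF/2025-MSMIN5IN52-GenAI | groupe-protagoras/code/src/preprocessing.py | normaliser_en_logique_atomique
-- ===== SOURCE A (Python) =====
-- from typing import List, Dict, Any
--
-- def normaliser_en_logique_atomique(phrases: List[str]) -> List[str]:
--     """
--     Normalise une liste de phrases en propositions logiques atomiques (A, B, C...).
--     Chaque phrase unique est mappée à une lettre majuscule.
--     Exemple: ["p", "q", "p"] -> ["A", "B", "A"]
--     """
--     mapping = {}
--     lettres = [chr(ord('A') + i) for i in range(26)]
--     formules_resultat = []
--
--     lettre_idx = 0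
--     for phrase in phrases:
--         # Normaliser la phrase pour ignorer la casse et les espaces superflus
--         phrase_normalisee = phrase.strip().lower()
--         if phrase_normalisee not in mapping:
--             mapping[phrase_normalisee] = lettres[lettre_idx] if lettre_idx < len(lettres) else f"P{len(mapping)}"
--             lettre_idx += 1
--         formules_resultat.append(mapping[phrase_normalisee])
--
--     return formules_resultat
-- ===== SOURCE B (Python) =====
-- def normaliser_en_logique_atomique(phrases):
--     uniques = list(dict.fromkeys(p.strip().lower() for p in phrases))
--     mapping = {ph: (chr(ord('A') + i) if i < 26 else f"P{i}") for i, ph in enumerate(uniques)}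
--     return [mapping[p.strip().lower()] for p in phrases]
-- ===== Notes on version B (the rewrite author's own statement) =====
-- stated objective: alternative
-- what changed: A's single interleaved pass (dict, letter counter and result list maintained together per phrase) is split into three separate phases: an ordered dedup of the normalized phrases, one label table built from it by enumeration, then a plain lookup pass.
import Mathlib
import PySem

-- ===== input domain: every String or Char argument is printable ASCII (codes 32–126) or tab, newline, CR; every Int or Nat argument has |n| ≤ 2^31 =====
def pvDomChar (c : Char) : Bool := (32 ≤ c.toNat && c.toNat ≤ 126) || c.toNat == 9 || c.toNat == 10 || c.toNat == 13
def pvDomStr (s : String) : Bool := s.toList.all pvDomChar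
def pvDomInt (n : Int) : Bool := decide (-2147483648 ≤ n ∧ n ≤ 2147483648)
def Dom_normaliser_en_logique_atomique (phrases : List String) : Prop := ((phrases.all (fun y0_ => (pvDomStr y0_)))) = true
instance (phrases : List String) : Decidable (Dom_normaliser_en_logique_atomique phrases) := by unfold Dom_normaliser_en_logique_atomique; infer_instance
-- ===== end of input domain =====

-- B replaces A's single interleaved pass (dict + letter index + result list maintained together)
-- by two separate phases: first an ordered dedup of the normalized phrases, then one label table
-- built from it, then a plain lookup pass; same return value on every input (objective: alternative decomposition).

-- shared normalization: phrase.strip().lower()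
def pvNorm (p : String) : String := PySem.Str.lower (PySem.Str.strip p)

-- ===== PORT A =====
-- lettres = [chr(ord('A') + i) for i in range(26)]
def pvLettres : List String := (List.range 26).map (fun i => String.ofList [Char.ofNat (65 + i)])

-- one iteration of A's for-loop; state = (mapping, formules_resultat, lettre_idx)
def pvStepA (st : PySem.Dict String String × List String × Nat) (phrase : String) :
    PySem.Dict String String × List String × Nat :=
  let (mapping, res, idx) := st
  let pn := pvNorm phrase
  if mapping.contains pn then
    (mapping, res ++ [mapping.getD pn ""], idx)
  else
    let m' := mapping.insert pn
      (if idx < pvLettres.length then pvLettres.getD idx ""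
       else "P" ++ PySem.Int.toStr (mapping.size : Int))
    (m', res ++ [m'.getD pn ""], idx + 1)

def normaliser_en_logique_atomique (phrases : List String) : List String :=
  (phrases.foldl pvStepA (PySem.Dict.empty, [], 0)).2.1

-- ===== PORT B =====
-- chr(ord('A') + i) if i < 26 else f"P{i}"
def pvLab (i : Nat) : String :=
  if i < 26 then String.ofList [Char.ofNat (65 + i)] else "P" ++ PySem.Int.toStr (i : Int)

def normaliser_en_logique_atomique_alt (phrases : List String) : List String :=
  let uniques := PySem.List.dedup (phrases.map pvNorm)
  -- enumerate(uniques): zipIdx gives the same (element, 0-based index) pairs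
  let mapping : PySem.Dict String String :=
    PySem.Dict.ofList (uniques.zipIdx.map (fun pi => (pi.1, pvLab pi.2)))
  phrases.map (fun p => mapping.getD (pvNorm p) "")

-- ===== PRECONDITION & SPEC =====
def Spec_normaliser_en_logique_atomique (phrases : List String) (out : List String) : Prop := out = normaliser_en_logique_atomique_alt phrases
instance (phrases : List String) (out : List String) : Decidable (Spec_normaliser_en_logique_atomique phrases out) := by unfold Spec_normaliser_en_logique_atomique; infer_instance

-- ===== CLAIM (what is proved, stated in full; the proofs are below) =====
def Claim_equal_normaliser_en_logique_atomique : Prop := ∀ (phrases : List String), Dom_normaliser_en_logique_atomique phrases → Spec_normaliser_en_logique_atomique phrases (normaliser_en_logique_atomique phrases)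

-- ===== LEMMAS AND PROOFS =====

-- Set.update only appends new elements to the right
lemma pv_update_append {α : Type} [BEq α] (l : List α) :
    ∀ (s : PySem.Set α), ∃ t, PySem.Set.update s l = s ++ t := by
  induction l with
  | nil => intro s; exact ⟨[], by simp [PySem.Set.update]⟩
  | cons x xs ih =>
    intro s
    obtain ⟨t, ht⟩ := ih (PySem.Set.add s x)
    by_cases h : List.contains s x = true
    · exact ⟨t, by simpa [PySem.Set.update, PySem.Set.add, h] using ht⟩
    · refine ⟨[x] ++ t, ?_⟩
      have hax : PySem.Set.add s x = s ++ [x] := by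
        simp only [PySem.Set.add, PySem.Set.contains]
        rw [if_neg h]
      simpa [PySem.Set.update, hax, List.append_assoc] using ht

-- index of an already-present element is unchanged by later updates
lemma pv_idxOf_update {α : Type} [BEq α] [LawfulBEq α] (s : PySem.Set α) (l : List α)
    (u : α) (hu : u ∈ s) : List.idxOf u (PySem.Set.update s l) = List.idxOf u s := by
  obtain ⟨t, ht⟩ := pv_update_append l s
  rw [ht, List.idxOf_append, if_pos hu]

-- (ks.zipIdx).map Prod.fst = ks (no named library lemma in this snapshot)
lemma pv_map_fst_zipIdx {α : Type} (ks : List α) :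
    ∀ n, (ks.zipIdx n).map (fun pi => pi.1) = ks := by
  induction ks with
  | nil => intro n; rfl
  | cons x xs ih => intro n; simp [List.zipIdx_cons, ih]

-- lookup in B's label table = label of the index in the nodup key list
lemma pv_lookup_table (ks : List String) (hnd : ks.Nodup) (u : String) (hu : u ∈ ks) :
    (PySem.Dict.ofList (ks.zipIdx.map (fun pi => (pi.1, pvLab pi.2)))).getD u "" =
      pvLab (List.idxOf u ks) := by
  set l := ks.zipIdx.map (fun pi => (pi.1, pvLab pi.2)) with hl
  have hfst : l.map (fun p => p.1) = ks := by
    rw [hl, List.map_map]; exact pv_map_fst_zipIdx ks 0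
  have hitems : (PySem.Dict.ofList l).items = l := by
    have := PySem.Dict.items_foldl_insert_fresh l (fun p => p.1) (fun p => p.2)
      (PySem.Dict.empty)
      (by intro a _; exact PySem.Dict.contains_empty _)
      (by rw [show (List.map (fun p => p.1) l) = ks from hfst]; exact hnd)
    simpa [PySem.Dict.ofList, PySem.Dict.update] using this
  have hkeys : (PySem.Dict.ofList l).keys = ks := by
    simp [PySem.Dict.keys, hitems, hfst]
  have hlt : List.idxOf u ks < ks.length := List.idxOf_lt_length_of_mem hu
  have hmem : (u, pvLab (List.idxOf u ks)) ∈ l := by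
    have hlt' : List.idxOf u ks < (ks.zipIdx 0).length := by simpa using hlt
    have hget : (ks.zipIdx 0)[List.idxOf u ks] = (u, List.idxOf u ks) := by
      rw [List.getElem_zipIdx]; simp [List.getElem_idxOf hlt]
    have : (u, pvLab (List.idxOf u ks)) = l[List.idxOf u ks]'(by simpa [hl] using hlt) := by
      simp [hl, hget]
    rw [this]; exact List.getElem_mem _
  exact PySem.Dict.getD_of_mem_items _ (by rw [hitems]; exact hmem)
    (by rw [hkeys]; exact hnd) ""

-- invariant-carrying characterization of A's loop
lemma pv_foldA (ps : List String) :
    ∀ (m : PySem.Dict String String) (res : List String) (seen : List String),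
      m.keys = seen → seen.Nodup →
      (∀ u ∈ seen, m.getD u "" = pvLab (List.idxOf u seen)) →
      (ps.foldl pvStepA (m, res, seen.length)).2.1 =
        res ++ ps.map (fun p =>
          pvLab (List.idxOf (pvNorm p) (PySem.Set.update seen (ps.map pvNorm)))) := by
  induction ps with
  | nil => intro m res seen _ _ _; simp [PySem.Set.update]
  | cons p ps ih =>
    intro m res seen hkeys hnd hinv
    have hsize : m.size = seen.length := by
      have : m.keys.length = seen.length := by rw [hkeys]
      simpa [PySem.Dict.keys, PySem.Dict.size] using this
    by_cases hc : m.contains (pvNorm p) = true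
    · -- already mapped
      have hmem : pvNorm p ∈ seen := by
        rw [← hkeys]; exact (PySem.Dict.contains_iff_mem_keys m _).mp hc
      have hadd : PySem.Set.add seen (pvNorm p) = seen := by
        simp [PySem.Set.add, PySem.Set.contains, hmem]
      have hupd : PySem.Set.update seen (pvNorm p :: ps.map pvNorm)
          = PySem.Set.update seen (ps.map pvNorm) := by
        simp [PySem.Set.update, hadd]
      simp only [List.foldl_cons, List.map_cons, pvStepA, hc, if_true]
      rw [ih m (res ++ [m.getD (pvNorm p) ""]) seen hkeys hnd hinv]
      rw [hinv _ hmem]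
      rw [show (pvNorm p :: ps.map pvNorm) = List.map pvNorm (p :: ps) from rfl] at hupd
      simp only [List.map_cons] at hupd ⊢
      rw [hupd, pv_idxOf_update seen _ _ hmem, List.append_assoc]
      rfl
    · -- new phrase
      have hc' : m.contains (pvNorm p) = false := by simpa using hc
      have hnmem : pvNorm p ∉ seen := by
        rw [← hkeys]; intro h
        exact absurd ((PySem.Dict.contains_iff_mem_keys m _).mpr h) (by simp [hc'])
      have hlab : (if seen.length < pvLettres.length then pvLettres.getD seen.length ""
          else "P" ++ PySem.Int.toStr (m.size : Int)) = pvLab seen.length := by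
        have hlen : pvLettres.length = 26 := by simp [pvLettres]
        by_cases h26 : seen.length < 26
        · rw [if_pos (by rw [hlen]; exact h26), pvLab, if_pos h26, pvLettres,
            PySem.List.getD_map_range _ _ _ _ h26]
        · rw [if_neg (by rw [hlen]; exact h26), pvLab, if_neg h26, hsize]
      set m' := m.insert (pvNorm p)
        (if seen.length < pvLettres.length then pvLettres.getD seen.length ""
         else "P" ++ PySem.Int.toStr (m.size : Int)) with hm'
      have hkeys' : m'.keys = seen ++ [pvNorm p] := by
        rw [hm', PySem.Dict.keys_insert_of_not_contains m _ hc', hkeys]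
      have hnd' : (seen ++ [pvNorm p]).Nodup := by
        simp [List.nodup_append, hnd]
        intro a ha he
        exact hnmem (he ▸ ha)
      have hidxp : List.idxOf (pvNorm p) (seen ++ [pvNorm p]) = seen.length := by
        rw [List.idxOf_append, if_neg hnmem]; simp
      have hinv' : ∀ u ∈ seen ++ [pvNorm p],
          m'.getD u "" = pvLab (List.idxOf u (seen ++ [pvNorm p])) := by
        intro u hu
        rcases List.mem_append.mp hu with h | h
        · have hne : u ≠ pvNorm p := fun he => hnmem (he ▸ h)
          rw [hm', PySem.Dict.getD_insert_of_ne m _ _ hne, hinv u h,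
            List.idxOf_append, if_pos h]
        · have he : u = pvNorm p := by simpa using h
          rw [he, hm', PySem.Dict.getD_insert_self, hlab, hidxp]
      have hgetp : m'.getD (pvNorm p) "" = pvLab seen.length := by
        rw [hm', PySem.Dict.getD_insert_self, hlab]
      have hadd : PySem.Set.add seen (pvNorm p) = seen ++ [pvNorm p] := by
        simp [PySem.Set.add, PySem.Set.contains, hnmem]
      have hupd : ∀ l, PySem.Set.update seen (pvNorm p :: l)
          = PySem.Set.update (seen ++ [pvNorm p]) l := by
        intro l; simp [PySem.Set.update, hadd]
      simp only [List.foldl_cons, List.map_cons, pvStepA, hc', Bool.false_eq_true, if_false]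
      have hlen' : (seen ++ [pvNorm p]).length = seen.length + 1 := by simp
      rw [show (m', res ++ [m'.getD (pvNorm p) ""], seen.length + 1)
          = (m', res ++ [m'.getD (pvNorm p) ""], (seen ++ [pvNorm p]).length) by rw [hlen']]
      rw [ih m' (res ++ [m'.getD (pvNorm p) ""]) (seen ++ [pvNorm p]) hkeys' hnd' hinv']
      rw [hgetp, hupd (ps.map pvNorm)]
      rw [pv_idxOf_update (seen ++ [pvNorm p]) _ _ (by simp), hidxp, List.append_assoc]
      rfl

-- A's result, closed form
lemma pv_A_eq (phrases : List String) :
    normaliser_en_logique_atomique phrases =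
      phrases.map (fun p =>
        pvLab (List.idxOf (pvNorm p) (PySem.List.dedup (phrases.map pvNorm)))) := by
  have h := pv_foldA phrases PySem.Dict.empty [] []
    (by simp [PySem.Dict.keys, PySem.Dict.empty]) List.nodup_nil (by intro u hu; cases hu)
  have hupd : PySem.Set.update [] (phrases.map pvNorm)
      = PySem.List.dedup (phrases.map pvNorm) := by
    rw [PySem.List.dedup_eq_ofList, PySem.Set.ofList_eq_foldl]; rfl
  rw [normaliser_en_logique_atomique]
  simpa [hupd] using h

-- ===== VERDICT (by name: the statement is the Claim_ definition above) =====
theorem normaliser_en_logique_atomique_spec : Claim_equal_normaliser_en_logique_atomique := by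
  intro phrases _
  unfold Spec_normaliser_en_logique_atomique
  rw [pv_A_eq, normaliser_en_logique_atomique_alt]
  apply List.map_congr_left
  intro p hp
  have hmem : pvNorm p ∈ PySem.List.dedup (phrases.map pvNorm) := by
    rw [PySem.List.mem_dedup]; exact List.mem_map_of_mem hp
  rw [pv_lookup_table _ (PySem.List.nodup_dedup _) _ hmem]
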